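-- pv_equiv track=rewrite | github.com/vtarsh/code-rag-mcp | src/graph/queries.py | bfs_chain
-- ===== SOURCE A (Python) =====
-- from collections import deque
--
-- def bfs_chain(
--     seeds: list[str],
--     adj: dict[str, list[tuple[str, str, str]]],
--     depth_limit: int,
-- ) -> dict[str, tuple[int, str | None, str | None]]:
--     """BFS from seeds using adjacency list.
--
--     Returns {node: (depth, parent, edge_type)}.
--     """
--     visited: dict[str, tuple[int, str | None, str | None]] = {}
--     queue: deque[tuple[str, int]] = deque()
--     for s in seeds:
--         visited[s] = (0, None, None)
--         queue.append((s, 0))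
--     while queue:
--         node, depth = queue.popleft()
--         if depth >= depth_limit:
--             continue
--         for neighbor, etype, _detail in adj.get(node, []):
--             if neighbor.startswith(("pkg:", "proto:", "workflow:", "msg:", "svc:", "route:")):
--                 continue
--             if neighbor not in visited:
--                 visited[neighbor] = (depth + 1, node, etype)
--                 queue.append((neighbor, depth + 1))
--     return visited
-- ===== SOURCE B (Python) =====
-- def bfs_chain(
--     seeds: list[str],
--     adj: dict[str, list[tuple[str, str, str]]],
--     depth_limit: int,
-- ) -> dict[str, tuple[int, str | None, str | None]]:
--     """Wavefront BFS in staged passes: per depth, generate ALL candidate discoveries of the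
--     wave with one comprehension (no visited check), then a separate first-occurrence dedup
--     pass keeps the new ones; the result is accumulated as an ordered (node, entry) pair list
--     and turned into a dict once at the end."""
--     skip = ("pkg:", "proto:", "workflow:", "msg:", "svc:", "route:")
--
--     def first_occurrences(pairs, known):
--         """Keep the first pair per key not yet known; return kept pairs and enlarged key set."""
--         kept = []
--         for key, val in pairs:
--             if key not in known:
--                 known = known | {key}
--                 kept.append((key, val))
--         return kept, known
--
--     items, known = first_occurrences([(s, (0, None, None)) for s in seeds], frozenset())
--     wave, depth = items, 0
--     while wave and depth < depth_limit:
--         candidates = [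
--             (nb, (depth + 1, node, et))
--             for node, _ in wave
--             for nb, et, _ in adj.get(node, [])
--             if not nb.startswith(skip)
--         ]
--         wave, known = first_occurrences(candidates, known)
--         items = items + wave
--         depth += 1
--     return dict(items)
-- ===== Notes on version B (the rewrite author's own statement) =====
-- stated objective: alternative
-- what changed: Replaces the imperative (node,depth) deque with per-neighbor visited-dict updates by staged wavefront passes: each depth's candidate discoveries are generated wholesale by one comprehension with no visited check, a separate first-occurrence pass dedups them against a key set, and the result is accumulated as an ordered (node, entry) pair list turned into a dict once at the end.
import Mathlib
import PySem

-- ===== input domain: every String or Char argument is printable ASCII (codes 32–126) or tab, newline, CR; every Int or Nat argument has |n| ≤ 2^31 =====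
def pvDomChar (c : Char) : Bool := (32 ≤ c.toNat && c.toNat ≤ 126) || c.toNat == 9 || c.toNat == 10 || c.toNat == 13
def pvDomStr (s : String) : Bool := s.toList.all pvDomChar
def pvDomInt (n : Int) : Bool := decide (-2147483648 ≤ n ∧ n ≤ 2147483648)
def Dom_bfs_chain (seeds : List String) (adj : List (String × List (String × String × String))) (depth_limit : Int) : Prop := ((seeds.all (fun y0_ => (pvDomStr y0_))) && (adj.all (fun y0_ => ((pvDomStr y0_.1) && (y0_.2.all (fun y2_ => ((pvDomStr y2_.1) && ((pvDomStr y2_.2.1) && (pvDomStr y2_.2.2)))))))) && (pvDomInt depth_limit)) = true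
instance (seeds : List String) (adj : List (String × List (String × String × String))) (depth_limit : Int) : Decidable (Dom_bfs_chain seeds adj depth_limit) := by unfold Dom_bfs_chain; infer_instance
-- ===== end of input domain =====

-- B replaces A's (node, depth) deque and per-neighbor visited-dict updates by staged
-- wavefront passes (generate all candidates of a level, then a first-occurrence dedup pass)
-- accumulating an ordered pair list turned into a dict at the end: a different
-- decomposition, same asymptotic cost.

-- ===== PORT A =====
-- value stored per node: (depth, parent, edge_type)
abbrev pvV : Type := Int × Option String × Option String

def pvSkipA (s : String) : Bool :=
  PySem.Str.startswith s "pkg:" || PySem.Str.startswith s "proto:" ||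
  PySem.Str.startswith s "workflow:" || PySem.Str.startswith s "msg:" ||
  PySem.Str.startswith s "svc:" || PySem.Str.startswith s "route:"

-- the inner 'for neighbor, etype, _detail in adj.get(node, [])' loop of A
def pvInnerA (node : String) (depth : Int) (nbrs : List (String × String × String))
    (st : PySem.Dict String pvV × List (String × Int)) :
    PySem.Dict String pvV × List (String × Int) :=
  nbrs.foldl (fun st nb =>
    if pvSkipA nb.1 then st
    else if st.1.contains nb.1 then st
    else (st.1.insert nb.1 (depth + 1, some node, some nb.2.1), st.2 ++ [(nb.1, depth + 1)])) st

-- the 'while queue' loop of A; fuel is a totality guard only (pvFuel is always enough,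
-- proved below), each pop consumes one unit
def pvLoopA (adj : List (String × List (String × String × String))) (limit : Int) :
    Nat → PySem.Dict String pvV → List (String × Int) → PySem.Dict String pvV
  | _, v, [] => v
  | 0, v, _ => v
  | fuel + 1, v, (node, depth) :: rest =>
      if limit ≤ depth then pvLoopA adj limit fuel v rest
      else
        let st := pvInnerA node depth (PySem.Dict.getD (PySem.Dict.mk adj) node []) (v, rest)
        pvLoopA adj limit fuel st.1 st.2

def pvFuel (seeds : List String) (adj : List (String × List (String × String × String))) : Nat :=
  seeds.length + (adj.flatMap (fun p => p.2)).length

def bfs_chain (seeds : List String) (adj : List (String × List (String × String × String))) (depth_limit : Int) : List (String × Int × Option String × Option String) :=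
  -- 'for s in seeds: visited[s] = (0, None, None); queue.append((s, 0))'
  let st0 := seeds.foldl
    (fun (st : PySem.Dict String pvV × List (String × Int)) s =>
      (st.1.insert s (0, none, none), st.2 ++ [(s, (0 : Int))]))
    (PySem.Dict.empty, [])
  (pvLoopA adj depth_limit (pvFuel seeds adj) st0.1 st0.2).items

-- ===== PORT B =====
def pvSkipB (s : String) : Bool :=
  PySem.Str.startswith s "pkg:" || PySem.Str.startswith s "proto:" ||
  PySem.Str.startswith s "workflow:" || PySem.Str.startswith s "msg:" ||
  PySem.Str.startswith s "svc:" || PySem.Str.startswith s "route:"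

-- B's helper 'first_occurrences(pairs, known)': loop over pairs keeping the first pair per
-- unknown key; 'known | {key}' is PySem.Set.union known [key]
def pvFirstOcc (pairs : List (String × pvV)) (known : PySem.Set String) :
    List (String × pvV) × PySem.Set String :=
  let st := pairs.foldl
    (fun (st : PySem.Set String × List (String × pvV)) p =>
      if PySem.Set.contains st.1 p.1 then st
      else (PySem.Set.union st.1 [p.1], st.2 ++ [p]))
    (known, [])
  (st.2, st.1)

-- B's 'candidates' comprehension for one wave at the given depth
def pvCand (adj : List (String × List (String × String × String)))
    (wave : List (String × pvV)) (d : Int) : List (String × pvV) :=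
  wave.flatMap (fun e =>
    ((PySem.Dict.getD (PySem.Dict.mk adj) e.1 []).filter (fun t => !pvSkipB t.1)).map
      (fun t => (t.1, (d + 1, some e.1, some t.2.1))))

-- B's 'while wave and depth < depth_limit' loop: the Nat counter is the number of depth
-- steps still allowed ((depth_limit - depth).toNat), d the current depth
def pvWaveLoop (adj : List (String × List (String × String × String))) :
    Nat → List (String × pvV) → PySem.Set String → Int → List (String × pvV)
  | 0, _, _, _ => []
  | k + 1, wave, known, d =>
      if wave.isEmpty then []
      else
        let st := pvFirstOcc (pvCand adj wave d) known
        st.1 ++ pvWaveLoop adj k st.1 st.2 (d + 1)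

def bfs_chain_alt (seeds : List String) (adj : List (String × List (String × String × String))) (depth_limit : Int) : List (String × Int × Option String × Option String) :=
  -- 'items, known = first_occurrences([(s, (0, None, None)) for s in seeds], frozenset())'
  let st0 := pvFirstOcc (seeds.map (fun s => (s, ((0 : Int), none, none)))) PySem.Set.empty
  let items := st0.1 ++ pvWaveLoop adj depth_limit.toNat st0.1 st0.2 0
  -- 'return dict(items)'
  (items.foldl (fun (d : PySem.Dict String pvV) p => d.insert p.1 p.2) PySem.Dict.empty).items

-- ===== PRECONDITION & SPEC =====
def Spec_bfs_chain (seeds : List String) (adj : List (String × List (String × String × String))) (depth_limit : Int) (out : List (String × Int × Option String × Option String)) : Prop := out = bfs_chain_alt seeds adj depth_limit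
instance (seeds : List String) (adj : List (String × List (String × String × String))) (depth_limit : Int) (out : List (String × Int × Option String × Option String)) : Decidable (Spec_bfs_chain seeds adj depth_limit out) := by unfold Spec_bfs_chain; infer_instance

-- ===== CLAIM (what is proved, stated in full; the proofs are below) =====
def Claim_equal_bfs_chain : Prop := ∀ (seeds : List String) (adj : List (String × List (String × String × String))) (depth_limit : Int), Dom_bfs_chain seeds adj depth_limit → Spec_bfs_chain seeds adj depth_limit (bfs_chain seeds adj depth_limit)

-- ===== LEMMAS AND PROOFS =====

theorem pvSkip_eq (s : String) : pvSkipA s = pvSkipB s := rfl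

-- generic: a fold over a (state, accumulator-list) pair whose step only APPENDS to the
-- list (and whose effect does not depend on the list) splits off the accumulator
theorem foldl_pair_shift {α β γ : Type} (f : (γ × List β) → α → (γ × List β))
    (hf : ∀ v q a, f (v, q) a = ((f (v, []) a).1, q ++ (f (v, []) a).2)) :
    ∀ (l : List α) (v : γ) (q : List β),
    l.foldl f (v, q) = ((l.foldl f (v, [])).1, q ++ (l.foldl f (v, [])).2) := by
  intro l
  induction l with
  | nil => intro v q; simp
  | cons a l ih =>
    intro v q
    simp only [List.foldl_cons]
    rcases hfa : f (v, []) a with ⟨c, e⟩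
    rw [hf v q a, hfa]
    rw [ih c (q ++ e), ih c e]
    simp [List.append_assoc]

-- proof-side intermediate: the level-synchronous form of A's search (dict + key frontier)
def pvInnerB (node : String) (depth : Int) (nbrs : List (String × String × String))
    (st : PySem.Dict String pvV × List String) :
    PySem.Dict String pvV × List String :=
  nbrs.foldl (fun st nb =>
    if pvSkipB nb.1 then st
    else if st.1.contains nb.1 then st
    else (st.1.insert nb.1 (depth + 1, some node, some nb.2.1), st.2 ++ [nb.1])) st

def pvExpand (adj : List (String × List (String × String × String)))
    (v : PySem.Dict String pvV) (F : List String) (d : Int) :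
    PySem.Dict String pvV × List String :=
  F.foldl (fun st node => pvInnerB node d (PySem.Dict.getD (PySem.Dict.mk adj) node []) st) (v, [])

def pvLevels (adj : List (String × List (String × String × String))) :
    Nat → PySem.Dict String pvV → List String → Int → PySem.Dict String pvV
  | 0, v, _, _ => v
  | k + 1, v, F, d =>
      if F.isEmpty then v
      else
        let st := pvExpand adj v F d
        pvLevels adj k st.1 st.2 (d + 1)

-- the distinct candidate nodes that can ever be newly visited
def pvU (adj : List (String × List (String × String × String))) : List String :=
  ((adj.flatMap (fun p => p.2)).map (fun t => t.1)).dedup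

-- how many candidates are still unvisited
def pvSlack (adj : List (String × List (String × String × String)))
    (v : PySem.Dict String pvV) : Nat :=
  (pvU adj).countP (fun x => !(v.contains x))

theorem pvLoopA_nil (adj : List (String × List (String × String × String))) (limit : Int)
    (fuel : Nat) (v : PySem.Dict String pvV) : pvLoopA adj limit fuel v [] = v := by
  cases fuel <;> rfl

-- L1: A's inner fold only appends to the queue; the appended part is independent of it
theorem pvInnerA_shift (node : String) (depth : Int)
    (nbrs : List (String × String × String)) (v : PySem.Dict String pvV)
    (q : List (String × Int)) :
    pvInnerA node depth nbrs (v, q)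
      = ((pvInnerA node depth nbrs (v, [])).1, q ++ (pvInnerA node depth nbrs (v, [])).2) := by
  exact foldl_pair_shift _ (by intro v q a; dsimp only; split_ifs <;> simp) nbrs v q

-- L2: same for the level-synchronous inner fold
theorem pvInnerB_shift (node : String) (depth : Int)
    (nbrs : List (String × String × String)) (v : PySem.Dict String pvV)
    (q : List String) :
    pvInnerB node depth nbrs (v, q)
      = ((pvInnerB node depth nbrs (v, [])).1, q ++ (pvInnerB node depth nbrs (v, [])).2) := by
  exact foldl_pair_shift _ (by intro v q a; dsimp only; split_ifs <;> simp) nbrs v q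

-- L3: A's inner fold is the level-synchronous one with depths attached
theorem pvInnerAB (node : String) (depth : Int)
    (nbrs : List (String × String × String)) (v : PySem.Dict String pvV) :
    pvInnerA node depth nbrs (v, [])
      = ((pvInnerB node depth nbrs (v, [])).1,
         (pvInnerB node depth nbrs (v, [])).2.map (fun x => (x, depth + 1))) := by
  induction nbrs generalizing v with
  | nil => simp [pvInnerA, pvInnerB]
  | cons nb rest ih =>
    have stepA : ∀ st, pvInnerA node depth (nb :: rest) st
        = pvInnerA node depth rest
            (if pvSkipA nb.1 then st else if st.1.contains nb.1 then st
             else (st.1.insert nb.1 (depth + 1, some node, some nb.2.1), st.2 ++ [(nb.1, depth + 1)])) := by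
      intro st
      simp only [pvInnerA, List.foldl_cons]
    have stepB : ∀ st, pvInnerB node depth (nb :: rest) st
        = pvInnerB node depth rest
            (if pvSkipB nb.1 then st else if st.1.contains nb.1 then st
             else (st.1.insert nb.1 (depth + 1, some node, some nb.2.1), st.2 ++ [nb.1])) := by
      intro st
      simp only [pvInnerB, List.foldl_cons]
    rw [stepA, stepB, ← pvSkip_eq]
    by_cases h1 : pvSkipA nb.1
    · simp only [if_pos h1]; exact ih v
    · by_cases h2 : v.contains nb.1
      · simp only [if_neg h1, if_pos h2]; exact ih v
      · simp only [if_neg h1, if_neg h2]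
        rw [pvInnerA_shift, pvInnerB_shift, ih]
        simp

-- L4: the level fold only appends to next_frontier
theorem pvExpandFold_shift (adj : List (String × List (String × String × String)))
    (d : Int) (F : List String) (v : PySem.Dict String pvV) (acc : List String) :
    F.foldl (fun st node => pvInnerB node d (PySem.Dict.getD (PySem.Dict.mk adj) node []) st) (v, acc)
      = ((pvExpand adj v F d).1, acc ++ (pvExpand adj v F d).2) := by
  exact foldl_pair_shift _ (fun v q a => pvInnerB_shift a d _ v q) F v acc

-- L5: processing one whole level of A's queue = expanding the level then continuing
theorem pvLoopA_level (adj : List (String × List (String × String × String))) (limit : Int)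
    (d : Int) (hd : d < limit) :
    ∀ (F1 : List String) (fuel : Nat) (v : PySem.Dict String pvV) (F2 : List String),
    pvLoopA adj limit (F1.length + fuel) v
        (F1.map (fun s => (s, d)) ++ F2.map (fun s => (s, d + 1)))
      = pvLoopA adj limit fuel
          (F1.foldl (fun st node => pvInnerB node d (PySem.Dict.getD (PySem.Dict.mk adj) node []) st) (v, F2)).1
          ((F1.foldl (fun st node => pvInnerB node d (PySem.Dict.getD (PySem.Dict.mk adj) node []) st) (v, F2)).2.map (fun s => (s, d + 1))) := by
  intro F1
  induction F1 with
  | nil => intro fuel v F2; simp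
  | cons n F1 ih =>
    intro fuel v F2
    have hlen : (n :: F1).length + fuel = (F1.length + fuel) + 1 := by
      simp [List.length_cons]; omega
    rw [hlen]
    simp only [List.map_cons, List.cons_append, List.foldl_cons]
    rw [show pvLoopA adj limit ((F1.length + fuel) + 1) v
          ((n, d) :: (F1.map (fun s => (s, d)) ++ F2.map (fun s => (s, d + 1))))
        = if limit ≤ d then pvLoopA adj limit (F1.length + fuel) v
              (F1.map (fun s => (s, d)) ++ F2.map (fun s => (s, d + 1)))
          else
            pvLoopA adj limit (F1.length + fuel)
              (pvInnerA n d (PySem.Dict.getD (PySem.Dict.mk adj) n [])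
                 (v, F1.map (fun s => (s, d)) ++ F2.map (fun s => (s, d + 1)))).1
              (pvInnerA n d (PySem.Dict.getD (PySem.Dict.mk adj) n [])
                 (v, F1.map (fun s => (s, d)) ++ F2.map (fun s => (s, d + 1)))).2
        from rfl]
    rw [if_neg (not_le.mpr hd)]
    rw [pvInnerA_shift, pvInnerAB]
    rw [pvInnerB_shift n d _ v F2]
    have hq : (F1.map (fun s => (s, d)) ++ F2.map (fun s => (s, d + 1)))
          ++ ((pvInnerB n d (PySem.Dict.getD (PySem.Dict.mk adj) n []) (v, [])).2.map (fun x => (x, d + 1)))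
        = F1.map (fun s => (s, d))
          ++ (F2 ++ (pvInnerB n d (PySem.Dict.getD (PySem.Dict.mk adj) n []) (v, [])).2).map (fun s => (s, d + 1)) := by
      simp [List.append_assoc]
    simp only [hq]
    exact ih fuel _ _

-- L6: entries at depth ≥ limit are skipped, one fuel each
theorem pvLoopA_skip (adj : List (String × List (String × String × String))) (limit : Int)
    (d : Int) (hd : limit ≤ d) :
    ∀ (F : List String) (fuel : Nat) (v : PySem.Dict String pvV),
    pvLoopA adj limit (F.length + fuel) v (F.map (fun s => (s, d))) = v := by
  intro F
  induction F with
  | nil => intro fuel v; simpa using pvLoopA_nil adj limit fuel v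
  | cons n F ih =>
    intro fuel v
    have hlen : (n :: F).length + fuel = (F.length + fuel) + 1 := by
      simp [List.length_cons]; omega
    rw [hlen]
    simp only [List.map_cons]
    rw [show pvLoopA adj limit ((F.length + fuel) + 1) v ((n, d) :: F.map (fun s => (s, d)))
        = if limit ≤ d then pvLoopA adj limit (F.length + fuel) v (F.map (fun s => (s, d)))
          else
            pvLoopA adj limit (F.length + fuel)
              (pvInnerA n d (PySem.Dict.getD (PySem.Dict.mk adj) n [])
                 (v, F.map (fun s => (s, d)))).1
              (pvInnerA n d (PySem.Dict.getD (PySem.Dict.mk adj) n [])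
                 (v, F.map (fun s => (s, d)))).2
        from rfl]
    rw [if_pos hd]
    exact ih fuel v

-- L7: every neighbor list returned by adj.get is part of adj
theorem pvGetD_subset (adj : List (String × List (String × String × String))) (node : String)
    (nb : String × String × String)
    (h : nb ∈ PySem.Dict.getD (PySem.Dict.mk adj) node []) :
    nb ∈ adj.flatMap (fun p => p.2) := by
  induction adj with
  | nil => simp [PySem.Dict.getD, PySem.Dict.get?] at h
  | cons p rest ih =>
    rw [PySem.Dict.getD_eq_get?_getD, PySem.Dict.get?_mk_cons] at h
    by_cases hk : (p.1 == node) = true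
    · rw [if_pos hk] at h
      simp only [Option.getD_some] at h
      exact List.mem_flatMap.mpr ⟨p, List.mem_cons_self, h⟩
    · rw [if_neg hk, ← PySem.Dict.getD_eq_get?_getD] at h
      have := ih h
      rw [List.flatMap_cons]
      exact List.mem_append.mpr (Or.inr this)

-- L8: inserting a fresh candidate decreases the slack by exactly one
theorem pvCountP_insert (x : String) (w : pvV) (v : PySem.Dict String pvV) :
    ∀ (l : List String), l.Nodup → x ∈ l → v.contains x = false →
    (l.countP (fun y => !((v.insert x w).contains y))) + 1
      = l.countP (fun y => !(v.contains y)) := by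
  intro l
  induction l with
  | nil => intro _ hx; exact absurd hx (List.not_mem_nil)
  | cons a l ih =>
    intro hnd hx hc
    rcases List.nodup_cons.mp hnd with ⟨ha, hndl⟩
    simp only [List.countP_cons]
    by_cases hax : a = x
    · subst hax
      have h1 : ((v.insert a w).contains a) = true := PySem.Dict.contains_insert_self v a w
      have h2 : l.countP (fun y => !((v.insert a w).contains y)) = l.countP (fun y => !(v.contains y)) := by
        apply List.countP_congr
        intro y hy
        have hya : (y == a) = false := by
          simp only [beq_eq_false_iff_ne]
          intro hEq; exact ha (hEq ▸ hy)
        rw [PySem.Dict.contains_insert, hya]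
        simp
      rw [h1, h2, hc]
      simp
    · have hxl : x ∈ l := by
        rcases List.mem_cons.mp hx with h | h
        · exact absurd h.symm hax
        · exact h
      have hhead : ((v.insert x w).contains a) = (v.contains a) := by
        rw [PySem.Dict.contains_insert]
        have : (a == x) = false := by simp [beq_eq_false_iff_ne]; exact hax
        rw [this]
        simp
      rw [hhead]
      have := ih hndl hxl hc
      omega

-- L9: the inner fold keeps  |next_frontier| + slack  from growing
theorem pvInnerB_slack (adj : List (String × List (String × String × String)))
    (node : String) (d : Int) :
    ∀ (nbrs : List (String × String × String)) (st : PySem.Dict String pvV × List String),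
    (∀ nb ∈ nbrs, nb.1 ∈ pvU adj) →
    (pvInnerB node d nbrs st).2.length + pvSlack adj (pvInnerB node d nbrs st).1
      ≤ st.2.length + pvSlack adj st.1 := by
  intro nbrs
  induction nbrs with
  | nil => intro st _; simp [pvInnerB]
  | cons nb rest ih =>
    intro st hmem
    have step : pvInnerB node d (nb :: rest) st
        = pvInnerB node d rest
            (if pvSkipB nb.1 then st else if st.1.contains nb.1 then st
             else (st.1.insert nb.1 (d + 1, some node, some nb.2.1), st.2 ++ [nb.1])) := by
      simp only [pvInnerB, List.foldl_cons]
    rw [step]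
    have hrest : ∀ nb' ∈ rest, nb'.1 ∈ pvU adj := fun nb' h => hmem nb' (List.mem_cons_of_mem _ h)
    by_cases h1 : pvSkipB nb.1
    · rw [if_pos h1]; exact ih st hrest
    · by_cases h2 : st.1.contains nb.1
      · rw [if_neg h1, if_pos h2]; exact ih st hrest
      · rw [if_neg h1, if_neg h2]
        refine le_trans (ih _ hrest) ?_
        have hc : st.1.contains nb.1 = false := by
          exact Bool.not_eq_true _ ▸ (by simpa using h2)
        have hxU : nb.1 ∈ pvU adj := hmem nb List.mem_cons_self
        have hnd : (pvU adj).Nodup := List.nodup_dedup _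
        have := pvCountP_insert nb.1 (d + 1, some node, some nb.2.1) st.1 (pvU adj) hnd hxU hc
        simp only [pvSlack]
        simp only [List.length_append, List.length_cons, List.length_nil]
        omega

-- L10: so does expanding a whole level
theorem pvExpandFold_slack (adj : List (String × List (String × String × String))) (d : Int) :
    ∀ (F : List String) (st : PySem.Dict String pvV × List String),
    (F.foldl (fun st node => pvInnerB node d (PySem.Dict.getD (PySem.Dict.mk adj) node []) st) st).2.length
      + pvSlack adj (F.foldl (fun st node => pvInnerB node d (PySem.Dict.getD (PySem.Dict.mk adj) node []) st) st).1
      ≤ st.2.length + pvSlack adj st.1 := by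
  intro F
  induction F with
  | nil => intro st; simp
  | cons n F ih =>
    intro st
    simp only [List.foldl_cons]
    refine le_trans (ih _) ?_
    apply pvInnerB_slack
    intro nb hnb
    have := pvGetD_subset adj n nb hnb
    exact List.mem_dedup.mpr (List.mem_map_of_mem this)

theorem pvExpand_slack (adj : List (String × List (String × String × String)))
    (d : Int) (F : List String) (v : PySem.Dict String pvV) :
    (pvExpand adj v F d).2.length + pvSlack adj (pvExpand adj v F d).1 ≤ pvSlack adj v := by
  have := pvExpandFold_slack adj d F (v, [])
  simpa [pvExpand] using this

-- L11: with enough fuel A's queue loop computes the level-synchronous loop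
theorem pvMain (adj : List (String × List (String × String × String))) (limit : Int) :
    ∀ (k : Nat) (fuel : Nat) (v : PySem.Dict String pvV) (F : List String) (d : Int),
    (limit - d).toNat = k → F.length + pvSlack adj v ≤ fuel →
    pvLoopA adj limit fuel v (F.map (fun s => (s, d))) = pvLevels adj k v F d := by
  intro k
  induction k with
  | zero =>
    intro fuel v F d hk hfuel
    have hd : limit ≤ d := by omega
    have hfe : fuel = F.length + (fuel - F.length) := by omega
    rw [hfe, pvLoopA_skip adj limit d hd F (fuel - F.length) v]
    rfl
  | succ k ih =>
    intro fuel v F d hk hfuel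
    have hd : d < limit := by omega
    rcases F with _ | ⟨n, F'⟩
    · rw [show ([] : List String).map (fun s => (s, d)) = [] from rfl, pvLoopA_nil]
      simp [pvLevels]
    · set F := n :: F' with hF
      have hfe : fuel = F.length + (fuel - F.length) := by omega
      rw [hfe]
      have hlev := pvLoopA_level adj limit d hd F (fuel - F.length) v []
      simp only [List.map_nil, List.append_nil] at hlev
      rw [hlev]
      rw [pvExpandFold_shift adj d F v []]
      simp only [List.nil_append]
      have hslack := pvExpand_slack adj d F v
      have hrec := ih (fuel - F.length) (pvExpand adj v F d).1 (pvExpand adj v F d).2 (d + 1)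
        (by omega) (by omega)
      rw [hrec]
      conv_rhs => rw [show pvLevels adj (k + 1) v F d
          = if F.isEmpty then v
            else pvLevels adj k (pvExpand adj v F d).1 (pvExpand adj v F d).2 (d + 1) from rfl]
      rw [if_neg (by simp [hF])]

-- L12: A's seed-initialisation fold, split into dict and queue parts
theorem pvInitA (seeds : List String) (v : PySem.Dict String pvV) (acc : List (String × Int)) :
    seeds.foldl (fun (st : PySem.Dict String pvV × List (String × Int)) s =>
        (st.1.insert s (0, none, none), st.2 ++ [(s, (0 : Int))])) (v, acc)
      = (seeds.foldl (fun v s => v.insert s (0, none, none)) v,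
         acc ++ seeds.map (fun s => (s, (0 : Int)))) := by
  induction seeds generalizing v acc with
  | nil => simp
  | cons s seeds ih =>
    simp only [List.foldl_cons, List.map_cons]
    rw [ih]
    simp

theorem pvSlack_le (adj : List (String × List (String × String × String)))
    (v : PySem.Dict String pvV) :
    pvSlack adj v ≤ (adj.flatMap (fun p => p.2)).length := by
  calc pvSlack adj v ≤ (pvU adj).length := List.countP_le_length
    _ ≤ ((adj.flatMap (fun p => p.2)).map (fun t => t.1)).length :=
        (List.dedup_sublist _).length_le
    _ = (adj.flatMap (fun p => p.2)).length := List.length_map ..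

-- ===== bridging the level-synchronous form to B's staged passes =====

-- Set facts specialised to the builds B performs
theorem pv_contains_empty (x : String) : PySem.Set.contains (PySem.Set.empty) x = false := rfl

theorem pv_contains_add (s : PySem.Set String) (k x : String) :
    PySem.Set.contains (PySem.Set.add s k) x = ((x == k) || PySem.Set.contains s x) := by
  by_cases h : x = k
  · subst h
    simp [PySem.Set.contains, PySem.Set.mem_add]
  · have : (x == k) = false := by simp [h]
    simp [PySem.Set.contains, PySem.Set.mem_add, h, this]

-- the non-skipped candidate pairs contributed by one node
def pvCandOf (node : String) (d : Int) (nbrs : List (String × String × String)) :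
    List (String × pvV) :=
  (nbrs.filter (fun t => !pvSkipB t.1)).map (fun t => (t.1, (d + 1, some node, some t.2.1)))

def pvCandL (adj : List (String × List (String × String × String)))
    (F : List String) (d : Int) : List (String × pvV) :=
  F.flatMap (fun node => pvCandOf node d (PySem.Dict.getD (PySem.Dict.mk adj) node []))

theorem pvCand_eq (adj : List (String × List (String × String × String)))
    (wave : List (String × pvV)) (d : Int) :
    pvCand adj wave d = pvCandL adj (wave.map Prod.fst) d := by
  simp [pvCand, pvCandL, pvCandOf, List.flatMap_map]

-- processing a candidate stream against the dict (the level-synchronous core, flattened)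
def pvProc (c : List (String × pvV)) (v : PySem.Dict String pvV) (F : List String) :
    PySem.Dict String pvV × List String :=
  c.foldl (fun st p =>
    if st.1.contains p.1 then st else (st.1.insert p.1 p.2, st.2 ++ [p.1])) (v, F)

theorem pvProc_append (c1 c2 : List (String × pvV)) (v : PySem.Dict String pvV)
    (F : List String) :
    pvProc (c1 ++ c2) v F = pvProc c2 (pvProc c1 v F).1 (pvProc c1 v F).2 := by
  simp [pvProc, List.foldl_append]

-- C1: one node's inner fold is the flat processing of its candidate pairs
theorem pvInnerB_eq_proc (node : String) (d : Int) :
    ∀ (nbrs : List (String × String × String)) (v : PySem.Dict String pvV) (F : List String),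
    pvInnerB node d nbrs (v, F) = pvProc (pvCandOf node d nbrs) v F := by
  intro nbrs
  induction nbrs with
  | nil => intro v F; rfl
  | cons nb rest ih =>
    intro v F
    by_cases h1 : pvSkipB nb.1
    · have : pvCandOf node d (nb :: rest) = pvCandOf node d rest := by
        simp [pvCandOf, h1]
      rw [this, show pvInnerB node d (nb :: rest) (v, F) = pvInnerB node d rest (v, F) by
        simp [pvInnerB, List.foldl_cons, h1]]
      exact ih v F
    · have hc : pvCandOf node d (nb :: rest)
          = (nb.1, (d + 1, some node, some nb.2.1)) :: pvCandOf node d rest := by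
        simp [pvCandOf, h1]
      rw [hc]
      by_cases h2 : v.contains nb.1
      · rw [show pvInnerB node d (nb :: rest) (v, F) = pvInnerB node d rest (v, F) by
          simp [pvInnerB, List.foldl_cons, h1, h2]]
        rw [show pvProc ((nb.1, ((d + 1 : Int), some node, some nb.2.1)) :: pvCandOf node d rest) v F
            = pvProc (pvCandOf node d rest) v F by
          simp [pvProc, List.foldl_cons, h2]]
        exact ih v F
      · rw [show pvInnerB node d (nb :: rest) (v, F)
            = pvInnerB node d rest (v.insert nb.1 (d + 1, some node, some nb.2.1), F ++ [nb.1]) by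
          simp [pvInnerB, List.foldl_cons, h1, h2]]
        rw [show pvProc ((nb.1, ((d + 1 : Int), some node, some nb.2.1)) :: pvCandOf node d rest) v F
            = pvProc (pvCandOf node d rest) (v.insert nb.1 (d + 1, some node, some nb.2.1)) (F ++ [nb.1]) by
          simp [pvProc, List.foldl_cons, h2]]
        exact ih _ _

-- C2: a whole level's fold is the flat processing of the flattened candidate stream
theorem pvExpandFold_eq_proc (adj : List (String × List (String × String × String))) (d : Int) :
    ∀ (F : List String) (v : PySem.Dict String pvV) (acc : List String),
    F.foldl (fun st node => pvInnerB node d (PySem.Dict.getD (PySem.Dict.mk adj) node []) st) (v, acc)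
      = pvProc (pvCandL adj F d) v acc := by
  intro F
  induction F with
  | nil => intro v acc; rfl
  | cons n F ih =>
    intro v acc
    simp only [List.foldl_cons]
    rw [pvInnerB_eq_proc n d _ v acc]
    rw [show pvCandL adj (n :: F) d
        = pvCandOf n d (PySem.Dict.getD (PySem.Dict.mk adj) n []) ++ pvCandL adj F d by
      simp [pvCandL]]
    rw [pvProc_append]
    rcases h : pvProc (pvCandOf n d (PySem.Dict.getD (PySem.Dict.mk adj) n [])) v acc with ⟨v', acc'⟩
    exact ih v' acc'

theorem pvExpand_eq_proc (adj : List (String × List (String × String × String)))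
    (v : PySem.Dict String pvV) (F : List String) (d : Int) :
    pvExpand adj v F d = pvProc (pvCandL adj F d) v [] :=
  pvExpandFold_eq_proc adj d F v []

-- one step of pvFirstOcc
theorem pvFirstOcc_cons (p : String × pvV) (c : List (String × pvV))
    (known : PySem.Set String) :
    pvFirstOcc (p :: c) known
      = if PySem.Set.contains known p.1 then pvFirstOcc c known
        else (p :: (pvFirstOcc c (PySem.Set.add known p.1)).1,
              (pvFirstOcc c (PySem.Set.add known p.1)).2) := by
  unfold pvFirstOcc
  dsimp only
  rw [List.foldl_cons]
  dsimp only
  by_cases h : PySem.Set.contains known p.1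
  · rw [if_pos h, if_pos h]
  · rw [if_neg h, if_neg h]
    have hshift := foldl_pair_shift
      (fun (st : PySem.Set String × List (String × pvV)) q =>
        if PySem.Set.contains st.1 q.1 then st
        else (PySem.Set.union st.1 [q.1], st.2 ++ [q]))
      (by intro v q a; dsimp only; split_ifs <;> simp)
      c (PySem.Set.union known [p.1]) [p]
    rw [show ([] : List (String × pvV)) ++ [p] = [p] from rfl, hshift]
    rfl

-- C3 (BRIDGE): processing a candidate stream against the dict  =  first-occurrence dedup
-- against the key set, when dict keys and set agree
theorem pvBridge (c : List (String × pvV)) :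
    ∀ (v : PySem.Dict String pvV) (known : PySem.Set String) (F : List String),
    (∀ x, v.contains x = PySem.Set.contains known x) →
    (pvProc c v F).1.items = v.items ++ (pvFirstOcc c known).1
    ∧ (pvProc c v F).2 = F ++ ((pvFirstOcc c known).1.map Prod.fst)
    ∧ ∀ x, (pvProc c v F).1.contains x = PySem.Set.contains (pvFirstOcc c known).2 x := by
  induction c with
  | nil =>
    intro v known F h
    refine ⟨by simp [pvProc, pvFirstOcc], by simp [pvProc, pvFirstOcc], ?_⟩
    intro x; simpa [pvProc, pvFirstOcc] using h x
  | cons p c ih =>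
    intro v known F h
    rw [pvFirstOcc_cons]
    by_cases hk : PySem.Set.contains known p.1
    · have hv : v.contains p.1 = true := by rw [h]; exact hk
      rw [if_pos hk]
      rw [show pvProc (p :: c) v F = pvProc c v F by simp [pvProc, List.foldl_cons, hv]]
      exact ih v known F h
    · have hv : v.contains p.1 = false := by rw [h]; exact Bool.eq_false_iff.mpr (by simpa using hk)
      rw [if_neg hk]
      rw [show pvProc (p :: c) v F = pvProc c (v.insert p.1 p.2) (F ++ [p.1]) by
        simp [pvProc, List.foldl_cons, hv]]
      have h' : ∀ x, (v.insert p.1 p.2).contains x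
          = PySem.Set.contains (PySem.Set.add known p.1) x := by
        intro x
        rw [PySem.Dict.contains_insert, pv_contains_add, h]
      obtain ⟨hi, hf, hcnt⟩ := ih (v.insert p.1 p.2) (PySem.Set.add known p.1) (F ++ [p.1]) h'
      refine ⟨?_, ?_, hcnt⟩
      · rw [hi, PySem.Dict.items_insert_of_not_contains _ _ hv]
        simp
      · rw [hf]; simp

-- C4: the level-synchronous loop computes B's wave loop, as item lists
theorem pvWaveMain (adj : List (String × List (String × String × String))) :
    ∀ (k : Nat) (v : PySem.Dict String pvV) (known : PySem.Set String)
      (wave : List (String × pvV)) (d : Int),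
    (∀ x, v.contains x = PySem.Set.contains known x) →
    (pvLevels adj k v (wave.map Prod.fst) d).items
      = v.items ++ pvWaveLoop adj k wave known d := by
  intro k
  induction k with
  | zero => intro v known wave d _; simp [pvLevels, pvWaveLoop]
  | succ k ih =>
    intro v known wave d h
    rcases wave with _ | ⟨p, wave'⟩
    · simp [pvLevels, pvWaveLoop]
    · set wave := p :: wave' with hw
      have hne : wave.isEmpty = false := by simp [hw]
      have hneF : (wave.map Prod.fst).isEmpty = false := by simp [hw]
      rw [show pvLevels adj (k + 1) v (wave.map Prod.fst) d
          = if (wave.map Prod.fst).isEmpty then v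
            else pvLevels adj k (pvExpand adj v (wave.map Prod.fst) d).1
              (pvExpand adj v (wave.map Prod.fst) d).2 (d + 1) from rfl]
      rw [hneF]
      simp only [Bool.false_eq_true, if_false]
      rw [show pvWaveLoop adj (k + 1) wave known d
          = if wave.isEmpty then []
            else (pvFirstOcc (pvCand adj wave d) known).1
              ++ pvWaveLoop adj k (pvFirstOcc (pvCand adj wave d) known).1
                   (pvFirstOcc (pvCand adj wave d) known).2 (d + 1) from rfl]
      rw [hne]
      simp only [Bool.false_eq_true, if_false]
      rw [pvExpand_eq_proc, ← pvCand_eq]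
      obtain ⟨hi, hf, hcnt⟩ := pvBridge (pvCand adj wave d) v known [] h
      rw [hf]
      simp only [List.nil_append]
      rw [ih (pvProc (pvCand adj wave d) v []).1 (pvFirstOcc (pvCand adj wave d) known).2
        (pvFirstOcc (pvCand adj wave d) known).1 (d + 1) hcnt]
      rw [hi]
      simp [List.append_assoc]

-- ===== duplicate seeds: a later copy of an already-expanded node is a no-op =====

-- node s has been fully expanded into v
def pvExpanded (adj : List (String × List (String × String × String)))
    (v : PySem.Dict String pvV) (s : String) : Prop :=
  ∀ nb ∈ PySem.Dict.getD (PySem.Dict.mk adj) s [], pvSkipB nb.1 = false → v.contains nb.1 = true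

theorem pvInnerB_mono (node : String) (d : Int) :
    ∀ (nbrs : List (String × String × String)) (st : PySem.Dict String pvV × List String)
      (x : String), st.1.contains x = true → (pvInnerB node d nbrs st).1.contains x = true := by
  intro nbrs
  induction nbrs with
  | nil => intro st x hx; exact hx
  | cons nb rest ih =>
    intro st x hx
    rw [show pvInnerB node d (nb :: rest) st
        = pvInnerB node d rest
            (if pvSkipB nb.1 then st else if st.1.contains nb.1 then st
             else (st.1.insert nb.1 (d + 1, some node, some nb.2.1), st.2 ++ [nb.1])) by
      simp only [pvInnerB, List.foldl_cons]]
    split_ifs with h1 h2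
    · exact ih st x hx
    · exact ih st x hx
    · apply ih
      rw [PySem.Dict.contains_insert, hx]
      simp

theorem pvInnerB_expands (node : String) (d : Int) :
    ∀ (nbrs : List (String × String × String)) (st : PySem.Dict String pvV × List String)
      (nb : String × String × String), nb ∈ nbrs → pvSkipB nb.1 = false →
    (pvInnerB node d nbrs st).1.contains nb.1 = true := by
  intro nbrs
  induction nbrs with
  | nil => intro st nb hnb; exact absurd hnb (List.not_mem_nil)
  | cons hd rest ih =>
    intro st nb hnb hskip
    rw [show pvInnerB node d (hd :: rest) st
        = pvInnerB node d rest
            (if pvSkipB hd.1 then st else if st.1.contains hd.1 then st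
             else (st.1.insert hd.1 (d + 1, some node, some hd.2.1), st.2 ++ [hd.1])) by
      simp only [pvInnerB, List.foldl_cons]]
    rcases List.mem_cons.mp hnb with hh | ht
    · subst hh
      rw [if_neg (by simp [hskip])]
      by_cases h2 : st.1.contains nb.1
      · rw [if_pos h2]; exact pvInnerB_mono node d rest st nb.1 h2
      · rw [if_neg h2]
        exact pvInnerB_mono node d rest _ nb.1 (PySem.Dict.contains_insert_self _ _ _)
    · split_ifs <;> exact ih _ nb ht hskip

theorem pvInnerB_noop (node : String) (d : Int) :
    ∀ (nbrs : List (String × String × String)) (st : PySem.Dict String pvV × List String),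
    (∀ nb ∈ nbrs, pvSkipB nb.1 = false → st.1.contains nb.1 = true) →
    pvInnerB node d nbrs st = st := by
  intro nbrs
  induction nbrs with
  | nil => intro st _; rfl
  | cons nb rest ih =>
    intro st h
    rw [show pvInnerB node d (nb :: rest) st
        = pvInnerB node d rest
            (if pvSkipB nb.1 then st else if st.1.contains nb.1 then st
             else (st.1.insert nb.1 (d + 1, some node, some nb.2.1), st.2 ++ [nb.1])) by
      simp only [pvInnerB, List.foldl_cons]]
    by_cases h1 : pvSkipB nb.1
    · rw [if_pos h1]; exact ih st (fun nb' h' hs => h nb' (List.mem_cons_of_mem _ h') hs)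
    · rw [if_neg h1, if_pos (h nb List.mem_cons_self (by simpa using h1))]
      exact ih st (fun nb' h' hs => h nb' (List.mem_cons_of_mem _ h') hs)

-- drop the occurrences of already-seen nodes from a frontier
def seenFilter : List String → PySem.Set String → List String
  | [], _ => []
  | s :: F, E =>
      if PySem.Set.contains E s then seenFilter F E
      else s :: seenFilter F (PySem.Set.add E s)

theorem seenFilter_cons (s : String) (F : List String) (E : PySem.Set String) :
    seenFilter (s :: F) E
      = if PySem.Set.contains E s then seenFilter F E
        else s :: seenFilter F (PySem.Set.add E s) := rfl

theorem pvFold_dedup (adj : List (String × List (String × String × String))) (d : Int) :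
    ∀ (F : List String) (st : PySem.Dict String pvV × List String) (E : PySem.Set String),
    (∀ s, PySem.Set.contains E s = true → pvExpanded adj st.1 s) →
    F.foldl (fun st node => pvInnerB node d (PySem.Dict.getD (PySem.Dict.mk adj) node []) st) st
      = (seenFilter F E).foldl
          (fun st node => pvInnerB node d (PySem.Dict.getD (PySem.Dict.mk adj) node []) st) st := by
  intro F
  induction F with
  | nil => intro st E _; rfl
  | cons s F ih =>
    intro st E hE
    by_cases hs : PySem.Set.contains E s
    · rw [show seenFilter (s :: F) E = seenFilter F E by rw [seenFilter_cons, if_pos hs]]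
      simp only [List.foldl_cons]
      rw [pvInnerB_noop s d _ st (hE s hs)]
      exact ih st E hE
    · rw [show seenFilter (s :: F) E = s :: seenFilter F (PySem.Set.add E s) by
        rw [seenFilter_cons, if_neg hs]]
      simp only [List.foldl_cons]
      apply ih
      intro t ht
      rw [pv_contains_add] at ht
      rcases Bool.or_eq_true_iff.mp ht with h1 | h2
      · have hts : t = s := by simpa using h1
        intro nb hnb hskip
        rw [hts] at hnb
        exact pvInnerB_expands s d _ st nb hnb hskip
      · intro nb hnb hskip
        exact pvInnerB_mono s d _ st nb.1 (hE t h2 nb hnb hskip)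

theorem pvLevels_dedup (adj : List (String × List (String × String × String)))
    (k : Nat) (v : PySem.Dict String pvV) (F : List String) (d : Int) :
    pvLevels adj k v F d = pvLevels adj k v (seenFilter F PySem.Set.empty) d := by
  cases k with
  | zero => rfl
  | succ k =>
    rcases F with _ | ⟨s, F'⟩
    · rfl
    · have hE : ∀ t, PySem.Set.contains PySem.Set.empty t = true
          → pvExpanded adj ((v, ([] : List String)).1) t := by
        intro t ht; rw [pv_contains_empty] at ht; exact absurd ht (by simp)
      have hdd := pvFold_dedup adj d (s :: F') (v, []) PySem.Set.empty hE
      have hsf : seenFilter (s :: F') PySem.Set.empty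
          = s :: seenFilter F' (PySem.Set.add PySem.Set.empty s) := by
        rw [seenFilter_cons,
          if_neg (by intro hh; rw [pv_contains_empty] at hh; exact absurd hh Bool.false_ne_true)]
      rw [show pvLevels adj (k + 1) v (s :: F') d
          = if (s :: F').isEmpty then v
            else pvLevels adj k (pvExpand adj v (s :: F') d).1 (pvExpand adj v (s :: F') d).2 (d + 1)
          from rfl]
      rw [show pvLevels adj (k + 1) v (seenFilter (s :: F') PySem.Set.empty) d
          = if (seenFilter (s :: F') PySem.Set.empty).isEmpty then v
            else pvLevels adj k (pvExpand adj v (seenFilter (s :: F') PySem.Set.empty) d).1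
              (pvExpand adj v (seenFilter (s :: F') PySem.Set.empty) d).2 (d + 1)
          from rfl]
      rw [hsf]
      simp only [List.isEmpty_cons, Bool.false_eq_true, if_false]
      rw [show pvExpand adj v (s :: F') d
          = pvExpand adj v (s :: seenFilter F' (PySem.Set.add PySem.Set.empty s)) d by
        unfold pvExpand
        rw [pvFold_dedup adj d (s :: F') (v, []) PySem.Set.empty hE, hsf]]

-- the two seed initialisations agree: same items, same keys, dedup-filtered key order
theorem pvInsert_const_self (v : PySem.Dict String pvV) (s : String)
    (hc : v.contains s = true) (hv : ∀ p ∈ v.items, p.2 = ((0 : Int), none, none)) :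
    v.insert s ((0 : Int), none, none) = v := by
  apply PySem.Dict.ext
  rw [PySem.Dict.items_insert_of_contains _ _ hc]
  have hpt : ∀ p ∈ v.items,
      (if (p.1 == s) = true then (s, ((0 : Int), none, none)) else p) = p := by
    intro p hp
    by_cases hps : (p.1 == s) = true
    · have h1 : p.1 = s := by simpa using hps
      rw [if_pos hps, ← h1, ← hv p hp]
    · rw [if_neg hps]
  conv_rhs => rw [← List.map_id v.items]
  exact List.map_congr_left hpt

theorem pvInitAlt (seeds : List String) :
    ∀ (v : PySem.Dict String pvV) (known : PySem.Set String),
    (∀ x, v.contains x = PySem.Set.contains known x) →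
    (∀ p ∈ v.items, p.2 = ((0 : Int), none, none)) →
    (seeds.foldl (fun v s => v.insert s ((0 : Int), none, none)) v).items
      = v.items ++ (pvFirstOcc (seeds.map (fun s => (s, ((0 : Int), none, none)))) known).1
    ∧ (∀ x, (seeds.foldl (fun v s => v.insert s ((0 : Int), none, none)) v).contains x
        = PySem.Set.contains (pvFirstOcc (seeds.map (fun s => (s, ((0 : Int), none, none)))) known).2 x)
    ∧ (pvFirstOcc (seeds.map (fun s => (s, ((0 : Int), none, none)))) known).1.map Prod.fst
        = seenFilter seeds known := by
  induction seeds with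
  | nil =>
    intro v known h _
    refine ⟨by simp [pvFirstOcc], ?_, by simp [pvFirstOcc, seenFilter]⟩
    intro x; simpa [pvFirstOcc] using h x
  | cons s seeds ih =>
    intro v known h hv
    simp only [List.map_cons, List.foldl_cons]
    rw [pvFirstOcc_cons]
    by_cases hk : PySem.Set.contains known s
    · have hc : v.contains s = true := by rw [h]; exact hk
      rw [if_pos hk, pvInsert_const_self v s hc hv]
      obtain ⟨h1, h2, h3⟩ := ih v known h hv
      refine ⟨h1, h2, ?_⟩
      rw [h3, show seenFilter (s :: seeds) known = seenFilter seeds known by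
        rw [seenFilter_cons, if_pos hk]]
    · have hc : v.contains s = false := by
        rw [h]; exact Bool.eq_false_iff.mpr (by simpa using hk)
      rw [if_neg hk]
      have h' : ∀ x, (v.insert s ((0 : Int), none, none)).contains x
          = PySem.Set.contains (PySem.Set.add known s) x := by
        intro x; rw [PySem.Dict.contains_insert, pv_contains_add, h]
      have hv' : ∀ p ∈ (v.insert s ((0 : Int), none, none)).items,
          p.2 = ((0 : Int), none, none) := by
        intro p hp
        rw [PySem.Dict.items_insert_of_not_contains _ _ hc] at hp
        rcases List.mem_append.mp hp with h1 | h2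
        · exact hv p h1
        · simp only [List.mem_singleton] at h2
          rw [h2]
      obtain ⟨h1, h2, h3⟩ := ih (v.insert s ((0 : Int), none, none)) (PySem.Set.add known s) h' hv'
      refine ⟨?_, h2, ?_⟩
      · rw [h1, PySem.Dict.items_insert_of_not_contains _ _ hc]
        simp
      · rw [show seenFilter (s :: seeds) known
            = s :: seenFilter seeds (PySem.Set.add known s) by rw [seenFilter_cons, if_neg hk]]
        simp only [List.map_cons]
        rw [h3]

-- dict keys stay unique through the whole search
theorem pvInnerB_nodup (node : String) (d : Int) :
    ∀ (nbrs : List (String × String × String)) (st : PySem.Dict String pvV × List String),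
    st.1.keys.Nodup → (pvInnerB node d nbrs st).1.keys.Nodup := by
  intro nbrs
  induction nbrs with
  | nil => intro st h; exact h
  | cons nb rest ih =>
    intro st h
    rw [show pvInnerB node d (nb :: rest) st
        = pvInnerB node d rest
            (if pvSkipB nb.1 then st else if st.1.contains nb.1 then st
             else (st.1.insert nb.1 (d + 1, some node, some nb.2.1), st.2 ++ [nb.1])) by
      simp only [pvInnerB, List.foldl_cons]]
    split_ifs with h1 h2
    · exact ih st h
    · exact ih st h
    · exact ih _ (PySem.Dict.nodup_keys_insert _ _ _ h)

theorem pvExpand_nodup (adj : List (String × List (String × String × String))) (d : Int) :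
    ∀ (F : List String) (st : PySem.Dict String pvV × List String),
    st.1.keys.Nodup →
    ((F.foldl (fun st node => pvInnerB node d (PySem.Dict.getD (PySem.Dict.mk adj) node []) st) st).1).keys.Nodup := by
  intro F
  induction F with
  | nil => intro st h; exact h
  | cons n F ih =>
    intro st h
    simp only [List.foldl_cons]
    exact ih _ (pvInnerB_nodup n d _ st h)

theorem pvLevels_nodup (adj : List (String × List (String × String × String))) :
    ∀ (k : Nat) (v : PySem.Dict String pvV) (F : List String) (d : Int),
    v.keys.Nodup → (pvLevels adj k v F d).keys.Nodup := by
  intro k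
  induction k with
  | zero => intro v F d h; exact h
  | succ k ih =>
    intro v F d h
    rw [show pvLevels adj (k + 1) v F d
        = if F.isEmpty then v
          else pvLevels adj k (pvExpand adj v F d).1 (pvExpand adj v F d).2 (d + 1) from rfl]
    split_ifs
    · exact h
    · exact ih _ _ _ (pvExpand_nodup adj d F (v, []) h)

-- rebuilding a dict from items with unique keys is the identity
theorem pvOfItems (l : List (String × pvV)) (hnd : (l.map Prod.fst).Nodup) :
    (l.foldl (fun (d : PySem.Dict String pvV) p => d.insert p.1 p.2) PySem.Dict.empty).items
      = l := by
  have h := PySem.Dict.items_foldl_insert_fresh (l := l) (k := Prod.fst) (v := Prod.snd)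
    (d := (PySem.Dict.empty : PySem.Dict String pvV))
    (by intro a _; exact PySem.Dict.contains_empty _) hnd
  simpa using h

-- ===== VERDICT (by name: the statement is the Claim_ definition above) =====
theorem bfs_chain_spec : Claim_equal_bfs_chain := by
  intro seeds adj depth_limit _
  unfold Spec_bfs_chain bfs_chain
  rw [pvInitA seeds PySem.Dict.empty []]
  simp only [List.nil_append]
  have hmain : pvLoopA adj depth_limit (pvFuel seeds adj)
      (seeds.foldl (fun (v : PySem.Dict String pvV) s => v.insert s (0, none, none)) PySem.Dict.empty)
      (seeds.map (fun s => (s, (0 : Int))))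
      = pvLevels adj depth_limit.toNat
          (seeds.foldl (fun (v : PySem.Dict String pvV) s => v.insert s (0, none, none)) PySem.Dict.empty)
          seeds 0 := by
    apply pvMain adj depth_limit depth_limit.toNat
    · rw [Int.sub_zero]
    · unfold pvFuel
      have := pvSlack_le adj
        (seeds.foldl (fun (v : PySem.Dict String pvV) s => v.insert s (0, none, none)) PySem.Dict.empty)
      omega
  rw [hmain]
  obtain ⟨h1, h2, h3⟩ := pvInitAlt seeds PySem.Dict.empty PySem.Set.empty
    (by intro x; rw [pv_contains_empty, PySem.Dict.contains_empty])
    (by intro p hp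
        rw [show (PySem.Dict.empty : PySem.Dict String pvV).items = [] from rfl] at hp
        exact absurd hp (List.not_mem_nil))
  have h1' : (seeds.foldl (fun (v : PySem.Dict String pvV) s => v.insert s (0, none, none)) PySem.Dict.empty).items
      = (pvFirstOcc (seeds.map (fun s => (s, ((0 : Int), none, none)))) PySem.Set.empty).1 := by
    rw [h1]
    rfl
  have hitems : (pvLevels adj depth_limit.toNat
        (seeds.foldl (fun (v : PySem.Dict String pvV) s => v.insert s (0, none, none)) PySem.Dict.empty)
        seeds 0).items
      = (pvFirstOcc (seeds.map (fun s => (s, ((0 : Int), none, none)))) PySem.Set.empty).1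
        ++ pvWaveLoop adj depth_limit.toNat
             (pvFirstOcc (seeds.map (fun s => (s, ((0 : Int), none, none)))) PySem.Set.empty).1
             (pvFirstOcc (seeds.map (fun s => (s, ((0 : Int), none, none)))) PySem.Set.empty).2 0 := by
    rw [pvLevels_dedup, ← h3,
      pvWaveMain adj depth_limit.toNat
        (seeds.foldl (fun (v : PySem.Dict String pvV) s => v.insert s (0, none, none)) PySem.Dict.empty)
        (pvFirstOcc (seeds.map (fun s => (s, ((0 : Int), none, none)))) PySem.Set.empty).2
        (pvFirstOcc (seeds.map (fun s => (s, ((0 : Int), none, none)))) PySem.Set.empty).1 0 h2,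
      h1']
  rw [hitems]
  have hnodup : (((pvFirstOcc (seeds.map (fun s => (s, ((0 : Int), none, none)))) PySem.Set.empty).1
      ++ pvWaveLoop adj depth_limit.toNat
           (pvFirstOcc (seeds.map (fun s => (s, ((0 : Int), none, none)))) PySem.Set.empty).1
           (pvFirstOcc (seeds.map (fun s => (s, ((0 : Int), none, none)))) PySem.Set.empty).2 0).map
        Prod.fst).Nodup := by
    rw [← hitems]
    exact pvLevels_nodup adj depth_limit.toNat _ seeds 0
      (PySem.Dict.nodup_keys_foldl_insert seeds _ _ PySem.Dict.nodup_keys_empty)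
  exact (pvOfItems _ hnodup).symm
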